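-- pv_equiv track=rewrite | github.com/AngelAquino/SukatWika | scripts/parsing_functions.py | syll2phon_ilk
-- ===== SOURCE A (Python) =====
-- def syll2phon_ilk(syll):
--     """Input: word (single string). Output: phonemes (list of strings)."""
--
--     digraph_list = ['ng']
--     diphthong_list = ['ia', 'ie', 'io', 'iu', 'ea', 'eo', 'eu', 'ya', 'ye', 'yo', 'yu', 'oa', 'oe', 'ua', 'ue', 'uio', 'wa', 'we', 'wi']
--
--     phon_list = []
--     idx = 0
--
--     while idx < len(syll):
--         if idx + 2 < len(syll) and syll[idx:idx+3] in digraph_list + diphthong_list: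
--             phon_list.append(syll[idx:idx+3])
--             idx += 3
--         elif idx + 1 < len(syll) and syll[idx:idx+2] in digraph_list + diphthong_list:
--             phon_list.append(syll[idx:idx+2])
--             idx += 2
--         else:
--             phon_list.append(syll[idx])
--             idx += 1
--
--     return phon_list
-- ===== SOURCE B (Python) =====
-- def syll2phon_ilk(syll):
--     """Input: word (single string). Output: phonemes (list of strings)."""
--     two = {'ng', 'ia', 'ie', 'io', 'iu', 'ea', 'eo', 'eu', 'ya', 'ye', 'yo',
--            'yu', 'oa', 'oe', 'ua', 'ue', 'wa', 'we', 'wi'}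
--
--     out = []
--     for c in syll:
--         if len(out) >= 2 and out[-1] == 'i' and out[-2] == 'u' and c == 'o':
--             out[-2:] = ['uio']          # retroactively fuse the last three characters
--         elif out and out[-1] + c in two:
--             out[-1] += c                # fuse previous single char with c into a digraph/diphthong
--         else:
--             out.append(c)
--     return out
-- ===== Notes on version B (the rewrite author's own statement) =====
-- stated objective: faster
-- what changed: Replaces A's lookahead while loop (which rebuilds the concatenated digraph+diphthong list and slices the string on every iteration) by a single character-by-character pass with a prebuilt set, fusing the previous output element(s) retroactively when they form a token.
import Mathlib
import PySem

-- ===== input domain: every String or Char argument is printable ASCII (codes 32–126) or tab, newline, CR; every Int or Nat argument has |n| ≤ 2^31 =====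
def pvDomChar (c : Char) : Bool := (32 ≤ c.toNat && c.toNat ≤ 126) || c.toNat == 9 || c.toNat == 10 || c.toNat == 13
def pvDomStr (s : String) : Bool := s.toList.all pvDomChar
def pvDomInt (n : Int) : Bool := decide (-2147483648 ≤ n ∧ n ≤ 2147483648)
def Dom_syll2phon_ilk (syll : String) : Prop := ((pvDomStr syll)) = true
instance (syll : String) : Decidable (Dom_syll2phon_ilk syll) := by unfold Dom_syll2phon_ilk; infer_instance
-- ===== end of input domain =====

-- B replaces A's lookahead while loop (slice membership in digraph_list + diphthong_list) by a
-- single char-by-char pass that fuses the previous output element(s) retroactively: same return value.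

-- ===== PORT A =====
def syllDigraphs : List (List Char) := [['n','g']]
def syllDiphthongs : List (List Char) :=
  [['i','a'], ['i','e'], ['i','o'], ['i','u'], ['e','a'], ['e','o'], ['e','u'],
   ['y','a'], ['y','e'], ['y','o'], ['y','u'], ['o','a'], ['o','e'], ['u','a'],
   ['u','e'], ['u','i','o'], ['w','a'], ['w','e'], ['w','i']]

-- the while loop of A: state (idx, phon_list)
def syllALoop (cs : List Char) (idx : Nat) (phon : List String) : List String :=
  if _h : idx < cs.length then
    if idx + 2 < cs.length ∧
        PySem.List.slice cs (some (idx : Int)) (some ((idx + 3 : Nat) : Int))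
          ∈ syllDigraphs ++ syllDiphthongs then
      syllALoop cs (idx + 3)
        (phon ++ [String.ofList (PySem.List.slice cs (some (idx : Int)) (some ((idx + 3 : Nat) : Int)))])
    else if idx + 1 < cs.length ∧
        PySem.List.slice cs (some (idx : Int)) (some ((idx + 2 : Nat) : Int))
          ∈ syllDigraphs ++ syllDiphthongs then
      syllALoop cs (idx + 2)
        (phon ++ [String.ofList (PySem.List.slice cs (some (idx : Int)) (some ((idx + 2 : Nat) : Int)))])
    else
      match PySem.List.pyGet? cs (idx : Int) with
      | some c => syllALoop cs (idx + 1) (phon ++ [String.ofList [c]])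
      | none => phon   -- unreachable: idx < len(syll), so syll[idx] never raises
  else phon
termination_by cs.length - idx

def syll2phon_ilk (syll : String) : List String := syllALoop syll.toList 0 []

-- ===== PORT B =====
-- the set literal 'two' of Source B (a set of 2-char strings, held as char lists)
def syllTwo : List (List Char) :=
  [['n','g'], ['i','a'], ['i','e'], ['i','o'], ['i','u'], ['e','a'], ['e','o'],
   ['e','u'], ['y','a'], ['y','e'], ['y','o'], ['y','u'], ['o','a'], ['o','e'],
   ['u','a'], ['u','e'], ['w','a'], ['w','e'], ['w','i']]

-- one iteration of Source B's for-loop; out is kept in reverse (Python's out[-1] is the head)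
def syllBStep (out : List (List Char)) (c : Char) : List (List Char) :=
  match out with
  | i :: u :: rest =>
      if i = ['i'] ∧ u = ['u'] ∧ c = 'o' then
        ['u','i','o'] :: rest                     -- out[-2:] = ['uio']
      else if (i ++ [c]) ∈ syllTwo then
        (i ++ [c]) :: u :: rest                   -- out[-1] += c
      else
        [c] :: i :: u :: rest                     -- out.append(c)
  | [i] =>
      if (i ++ [c]) ∈ syllTwo then [i ++ [c]] else [c] :: [i]
  | [] => [[c]]

def syll2phon_ilk_alt (syll : String) : List String :=
  ((syll.toList.foldl syllBStep []).reverse).map String.ofList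

-- ===== PRECONDITION & SPEC =====
def Spec_syll2phon_ilk (syll : String) (out : List String) : Prop := out = syll2phon_ilk_alt syll
instance (syll : String) (out : List String) : Decidable (Spec_syll2phon_ilk syll out) := by unfold Spec_syll2phon_ilk; infer_instance

-- ===== CLAIM (what is proved, stated in full; the proofs are below) =====
def Claim_equal_syll2phon_ilk : Prop := ∀ (syll : String), Dom_syll2phon_ilk syll → Spec_syll2phon_ilk syll (syll2phon_ilk syll)

-- ===== LEMMAS AND PROOFS =====

-- the greedy tokenizer both programs compute (proof-side intermediate)
def grTok (cs : List Char) : List (List Char) :=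
  match cs with
  | [] => []
  | c :: rest =>
    if (c :: rest).take 3 = ['u','i','o'] then ['u','i','o'] :: grTok ((c :: rest).drop 3)
    else if (c :: rest).take 2 ∈ syllTwo then (c :: rest).take 2 :: grTok ((c :: rest).drop 2)
    else [c] :: grTok rest
termination_by cs.length
decreasing_by all_goals simp

-- a 3-character slice is in A's token list iff it is 'uio'
lemma mem_tokens_three (a b c : Char) :
    [a, b, c] ∈ syllDigraphs ++ syllDiphthongs ↔ a = 'u' ∧ b = 'i' ∧ c = 'o' := by
  simp [syllDigraphs, syllDiphthongs]

-- a 2-character slice is in A's token list iff it is one of B's 2-char tokens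
lemma mem_tokens_two (a b : Char) :
    [a, b] ∈ syllDigraphs ++ syllDiphthongs ↔ [a, b] ∈ syllTwo := by
  simp [syllDigraphs, syllDiphthongs, syllTwo]

-- slice cs[idx:idx+k] is take k of the suffix at idx
lemma slice_drop_take (cs : List Char) (idx k : Nat) :
    PySem.List.slice cs (some (idx : Int)) (some ((idx + k : Nat) : Int)) = (cs.drop idx).take k := by
  rw [PySem.List.slice_toNat]
  · simp; omega
  · positivity
  · positivity

-- every element of syllTwo has two characters
lemma syllTwo_len2 : ∀ l ∈ syllTwo, l.length = 2 := by
  intro l hl; fin_cases hl <;> rfl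

lemma not_mem_syllTwo_of_len (l : List Char) (h : l.length ≠ 2) : l ∉ syllTwo :=
  fun hm => h (syllTwo_len2 l hm)

-- a single character is never a 2-char token of B
lemma one_not_in_syllTwo (c : Char) : [c] ∉ syllTwo :=
  not_mem_syllTwo_of_len [c] (by simp)

-- syll[idx] is the head of the suffix at idx
lemma pyGet_head (cs : List Char) (idx : Nat) (c : Char) (rest : List Char)
    (hd : cs.drop idx = c :: rest) :
    PySem.List.pyGet? cs (idx : Int) = some c := by
  rw [PySem.List.pyGet?_natCast]
  have h0 : cs[idx]? = (cs.drop idx)[0]? := by simp [List.getElem?_drop]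
  rw [h0, hd]; rfl

-- ===== A's loop computes the greedy tokenization =====
lemma syllALoop_eq (cs : List Char) (idx : Nat) (phon : List String) :
    syllALoop cs idx phon = phon ++ (grTok (cs.drop idx)).map String.ofList := by
  have H : ∀ n idx phon, cs.length - idx = n →
      syllALoop cs idx phon = phon ++ (grTok (cs.drop idx)).map String.ofList := by
    intro n
    induction n using Nat.strong_induction_on with
    | _ n ih =>
      intro idx phon hn
      rw [syllALoop]
      by_cases hlt : idx < cs.length
      · have hlen : (cs.drop idx).length = cs.length - idx := List.length_drop
        have hd1 : cs.drop (idx + 1) = (cs.drop idx).drop 1 := by rw [List.drop_drop]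
        have hd2 : cs.drop (idx + 2) = (cs.drop idx).drop 2 := by rw [List.drop_drop]
        have hd3 : cs.drop (idx + 3) = (cs.drop idx).drop 3 := by rw [List.drop_drop]
        rcases hd : cs.drop idx with - | ⟨c1, - | ⟨c2, - | ⟨c3, r⟩⟩⟩
        · -- impossible: idx < length but suffix empty
          rw [hd] at hlen; simp at hlen; omega
        · -- one character left
          rw [hd] at hlen hd1; simp at hlen
          rw [dif_pos hlt, if_neg (by rintro ⟨h1, -⟩; omega),
              if_neg (by rintro ⟨h1, -⟩; omega), pyGet_head cs idx c1 [] hd]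
          show syllALoop cs (idx + 1) (phon ++ [String.ofList [c1]]) = _
          rw [ih (cs.length - (idx + 1)) (by omega) (idx + 1) _ rfl, hd1]
          simp [grTok, one_not_in_syllTwo]
        · -- two characters left
          rw [hd] at hlen hd1 hd2; simp at hlen
          have hs2 : PySem.List.slice cs (some (idx : Int)) (some ((idx + 2 : Nat) : Int))
              = [c1, c2] := by rw [slice_drop_take, hd]; rfl
          rw [dif_pos hlt, if_neg (by rintro ⟨h1, -⟩; omega)]
          by_cases hmem : [c1, c2] ∈ syllDigraphs ++ syllDiphthongs
          · have hb : [c1, c2] ∈ syllTwo := (mem_tokens_two c1 c2).mp hmem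
            rw [if_pos ⟨by omega, by rw [hs2]; exact hmem⟩, hs2,
                ih (cs.length - (idx + 2)) (by omega) (idx + 2) _ rfl, hd2]
            simp [grTok, hb]
          · have hb : [c1, c2] ∉ syllTwo := fun h => hmem ((mem_tokens_two c1 c2).mpr h)
            rw [if_neg (by rintro ⟨-, h2⟩; rw [hs2] at h2; exact hmem h2),
                pyGet_head cs idx c1 [c2] hd]
            show syllALoop cs (idx + 1) (phon ++ [String.ofList [c1]]) = _
            rw [ih (cs.length - (idx + 1)) (by omega) (idx + 1) _ rfl, hd1]
            simp [grTok, hb, one_not_in_syllTwo]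
        · -- at least three characters left
          rw [hd] at hlen hd1 hd2 hd3; simp at hlen
          have hs3 : PySem.List.slice cs (some (idx : Int)) (some ((idx + 3 : Nat) : Int))
              = [c1, c2, c3] := by rw [slice_drop_take, hd]; rfl
          have hs2 : PySem.List.slice cs (some (idx : Int)) (some ((idx + 2 : Nat) : Int))
              = [c1, c2] := by rw [slice_drop_take, hd]; rfl
          rw [dif_pos hlt]
          by_cases h3 : c1 = 'u' ∧ c2 = 'i' ∧ c3 = 'o'
          · rw [if_pos ⟨by omega, by rw [hs3]; exact (mem_tokens_three c1 c2 c3).mpr h3⟩, hs3,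
                ih (cs.length - (idx + 3)) (by omega) (idx + 3) _ rfl, hd3]
            obtain ⟨e1, e2, e3⟩ := h3; subst e1; subst e2; subst e3
            simp [grTok]
          · rw [if_neg (by rintro ⟨-, h⟩; rw [hs3] at h; exact h3 ((mem_tokens_three c1 c2 c3).mp h))]
            by_cases hmem : [c1, c2] ∈ syllDigraphs ++ syllDiphthongs
            · have hb : [c1, c2] ∈ syllTwo := (mem_tokens_two c1 c2).mp hmem
              rw [if_pos ⟨by omega, by rw [hs2]; exact hmem⟩, hs2,
                  ih (cs.length - (idx + 2)) (by omega) (idx + 2) _ rfl, hd2]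
              simp [grTok, hb, h3]
            · have hb : [c1, c2] ∉ syllTwo := fun h => hmem ((mem_tokens_two c1 c2).mpr h)
              rw [if_neg (by rintro ⟨-, h2⟩; rw [hs2] at h2; exact hmem h2),
                  pyGet_head cs idx c1 (c2 :: c3 :: r) hd]
              show syllALoop cs (idx + 1) (phon ++ [String.ofList [c1]]) = _
              rw [ih (cs.length - (idx + 1)) (by omega) (idx + 1) _ rfl, hd1]
              simp [grTok, hb, h3]
      · rw [dif_neg hlt]
        have he : cs.drop idx = [] := by
          apply List.drop_eq_nil_of_le; omega
        rw [he]
        simp [grTok]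
  exact H (cs.length - idx) idx phon rfl

-- ===== B's fold computes the greedy tokenization =====

-- the invariant: the head token of the state cannot be fused with the upcoming characters
def syllP (s : List (List Char)) (cs : List Char) : Prop :=
  match cs, s with
  | [], _ => True
  | _, [] => True
  | _, t :: _ => (t ++ cs.take 1) ∉ syllTwo ∧ t ++ cs.take 2 ≠ ['u','i','o']

-- when the head token cannot absorb c, the step just pushes c
lemma step_push (s : List (List Char)) (c : Char)
    (h : ∀ t ts, s = t :: ts → (t ++ [c]) ∉ syllTwo) :
    syllBStep s c = [c] :: s := by
  match s with
  | [] => rfl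
  | [t] => simp [syllBStep, h t [] rfl]
  | i :: u :: ss =>
    have h1 := h i (u :: ss) rfl
    rw [syllBStep, if_neg (by rintro ⟨rfl, rfl, rfl⟩; exact h1 (by decide)), if_neg h1]

lemma machineAux : ∀ n (cs : List Char) (s : List (List Char)), cs.length = n → syllP s cs →
    List.foldl syllBStep s cs = (grTok cs).reverse ++ s := by
  intro n
  induction n using Nat.strong_induction_on with
  | _ n ih =>
    intro cs s hlen hP
    match cs with
    | [] => simp [grTok]
    | c1 :: rest =>
      have hpush1 : syllBStep s c1 = [c1] :: s := by
        apply step_push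
        intro t ts hs
        subst hs
        exact hP.1
      by_cases h3 : (c1 :: rest).take 3 = ['u','i','o']
      · -- the 'uio' group
        rcases rest with - | ⟨c2, - | ⟨c3, r⟩⟩
        · simp at h3
        · simp at h3
        have hu : c1 = 'u' ∧ c2 = 'i' ∧ c3 = 'o' := by simpa using h3
        obtain ⟨rfl, rfl, rfl⟩ := hu
        rw [List.foldl_cons, hpush1, List.foldl_cons,
            step_push (['u'] :: s) 'i'
              (by intro t ts hs; injection hs with h1 h2; subst h1; decide),
            List.foldl_cons,
            show syllBStep (['i'] :: ['u'] :: s) 'o' = ['u','i','o'] :: s from by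
              rw [syllBStep, if_pos ⟨rfl, rfl, rfl⟩]]
        rw [ih r.length (by simp at hlen ⊢; omega) r (['u','i','o'] :: s) rfl ?_]
        · rw [grTok, if_pos h3]
          simp
        · match r with
          | [] => trivial
          | d :: r' =>
            refine ⟨not_mem_syllTwo_of_len _ (by simp), fun he => ?_⟩
            have := congrArg List.length he
            simp at this
      · by_cases h2 : (c1 :: rest).take 2 ∈ syllTwo
        · -- a 2-char token
          match rest with
          | [] => exact absurd (by simpa using h2) (one_not_in_syllTwo c1)
          | c2 :: r =>
            have hm : [c1, c2] ∈ syllTwo := by simpa using h2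
            have hstep2 : syllBStep ([c1] :: s) c2 = [c1, c2] :: s := by
              match s with
              | [] =>
                rw [syllBStep, if_pos (by simpa using hm)]
                simp
              | t :: ss =>
                have hni : ¬([c1] = ['i'] ∧ t = ['u'] ∧ c2 = 'o') := by
                  rintro ⟨hi, rfl, rfl⟩
                  have hc1 : c1 = 'i' := by simpa using hi
                  subst hc1
                  exact hP.2 rfl
                rw [syllBStep, if_neg hni, if_pos (by simpa using hm)]
                simp
            rw [List.foldl_cons, hpush1, List.foldl_cons, hstep2]
            rw [ih r.length (by simp at hlen ⊢; omega) r ([c1, c2] :: s) rfl ?_]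
            · rw [grTok, if_neg h3, if_pos h2]
              simp
            · match r with
              | [] => trivial
              | d :: r' =>
                refine ⟨not_mem_syllTwo_of_len _ (by simp), fun he => ?_⟩
                match r' with
                | [] =>
                  have : c1 = 'u' ∧ c2 = 'i' ∧ d = 'o' := by simpa using he
                  obtain ⟨rfl, rfl, -⟩ := this
                  exact absurd hm (by decide)
                | e :: rr =>
                  have := congrArg List.length he
                  simp at this
        · -- a single character
          rw [List.foldl_cons, hpush1]
          rw [ih rest.length (by simp at hlen; omega) rest ([c1] :: s) rfl ?_]
          · rw [grTok, if_neg h3, if_neg h2]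
            simp
          · match rest with
            | [] => trivial
            | d :: r' =>
              refine ⟨fun hmem => h2 (by simpa using hmem), fun he => h3 (by simpa using he)⟩

-- syllP holds vacuously for the empty state
lemma syllP_nil (cs : List Char) : syllP [] cs := by cases cs <;> trivial

-- ===== VERDICT (by name: the statement is the Claim_ definition above) =====
theorem syll2phon_ilk_spec : Claim_equal_syll2phon_ilk := by
  intro syll _
  unfold Spec_syll2phon_ilk syll2phon_ilk syll2phon_ilk_alt
  rw [syllALoop_eq syll.toList 0 [], machineAux syll.toList.length syll.toList [] rfl (syllP_nil _)]
  simp
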